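-- pv_equiv track=rewrite | github.com/EnergeticQuanta17/Kannada-NLP | POS Tagging/Bi-LSTM/version 1/Training-POS-Chunk-Tagger-Using-BILSTM/predict_tags_using_model_and_generators.py | sentenceLengthsInLines
-- ===== SOURCE A (Python) =====
-- def sentenceLengthsInLines(lines):
--     """Find sentence lengths in conll lines."""
--     lengths = []
--     sentLen = 0
--     for line in lines:
--         if line.strip():
--             sentLen += 1
--         else:
--             lengths.append(sentLen)
--             sentLen = 0
--     return lengths
-- ===== SOURCE B (Python) =====
-- def sentenceLengthsInLines(lines):
--     """Find sentence lengths in conll lines."""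
--     blanks = [i for i, line in enumerate(lines) if not line.strip()]
--     lengths = []
--     prev = -1
--     for i in blanks:
--         lengths.append(i - prev - 1)
--         prev = i
--     return lengths
-- ===== Notes on version B (the rewrite author's own statement) =====
-- stated objective: alternative
-- what changed: Replaces the running per-sentence counter with a collect-boundaries-then-diff decomposition: first gather the indices of all blank lines, then emit consecutive differences (i - prev - 1) between blank-line indices.
import Mathlib
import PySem

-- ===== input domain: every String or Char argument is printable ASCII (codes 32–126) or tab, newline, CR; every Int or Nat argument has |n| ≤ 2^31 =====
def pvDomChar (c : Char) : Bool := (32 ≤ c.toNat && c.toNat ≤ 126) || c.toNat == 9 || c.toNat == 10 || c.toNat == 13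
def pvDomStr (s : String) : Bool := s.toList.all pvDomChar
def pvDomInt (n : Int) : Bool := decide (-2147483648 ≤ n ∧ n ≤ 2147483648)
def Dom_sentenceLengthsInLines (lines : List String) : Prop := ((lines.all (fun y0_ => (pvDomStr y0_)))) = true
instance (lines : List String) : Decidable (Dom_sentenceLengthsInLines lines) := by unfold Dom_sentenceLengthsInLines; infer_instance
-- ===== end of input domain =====

-- B replaces A's running per-sentence counter with a collect-blank-indices-then-diff
-- decomposition (alternative structure, same cost).

-- ===== PORT A =====
-- the for-loop over `lines` with state (lengths, sentLen)
def pvALoop (ls : List String) (lengths : List Int) (sentLen : Int) : List Int :=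
  match ls with
  | [] => lengths
  | line :: rest =>
    if PySem.Str.strip line ≠ "" then pvALoop rest lengths (sentLen + 1)
    else pvALoop rest (lengths ++ [sentLen]) 0

def sentenceLengthsInLines (lines : List String) : List Int :=
  pvALoop lines [] 0

-- ===== PORT B =====
-- the for-loop over `blanks` with state (lengths, prev)
def pvBLoop (blanks : List Int) (lengths : List Int) (prev : Int) : List Int :=
  match blanks with
  | [] => lengths
  | i :: rest => pvBLoop rest (lengths ++ [i - prev - 1]) i

def sentenceLengthsInLines_alt (lines : List String) : List Int :=
  let blanks : List Int :=
    ((PySem.List.enumerate lines).filter (fun p => PySem.Str.strip p.2 == "")).map (·.1)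
  pvBLoop blanks [] (-1)

-- ===== PRECONDITION & SPEC =====
def Spec_sentenceLengthsInLines (lines : List String) (out : List Int) : Prop := out = sentenceLengthsInLines_alt lines
instance (lines : List String) (out : List Int) : Decidable (Spec_sentenceLengthsInLines lines out) := by unfold Spec_sentenceLengthsInLines; infer_instance

-- ===== CLAIM (what is proved, stated in full; the proofs are below) =====
def Claim_equal_sentenceLengthsInLines : Prop := ∀ (lines : List String), Dom_sentenceLengthsInLines lines → Spec_sentenceLengthsInLines lines (sentenceLengthsInLines lines)

-- ===== LEMMAS AND PROOFS =====

-- Invariant: A's running counter sentLen equals (current index k) − (last blank index prev) − 1.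
theorem pvLoop_agree (ls : List String) : ∀ (k : Int) (acc : List Int) (prev : Int),
    pvALoop ls acc (k - prev - 1) =
      pvBLoop (((PySem.List.enumerate ls k).filter (fun p => PySem.Str.strip p.2 == "")).map (·.1)) acc prev := by
  induction ls with
  | nil => intro k acc prev; simp [pvALoop, pvBLoop, PySem.List.enumerate_nil]
  | cons line rest ih =>
    intro k acc prev
    rw [PySem.List.enumerate_cons]
    by_cases h : PySem.Str.strip line = ""
    · simp only [pvALoop, ne_eq, not_true_eq_false, if_false, List.filter_cons, h,
        beq_self_eq_true, if_true, List.map_cons, pvBLoop]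
      have h2 := ih (k + 1) (acc ++ [k - prev - 1]) k
      have h3 : (k + 1) - k - 1 = (0 : Int) := by ring
      rw [h3] at h2
      exact h2
    · simp only [pvALoop, h, ne_eq, not_false_eq_true, if_true, List.filter_cons]
      have hb : (PySem.Str.strip line == "") = false := by simpa using h
      rw [hb]
      have h2 := ih (k + 1) acc prev
      have h3 : (k + 1) - prev - 1 = k - prev - 1 + 1 := by ring
      rw [h3] at h2
      simpa using h2

-- ===== VERDICT (by name: the statement is the Claim_ definition above) =====
theorem sentenceLengthsInLines_spec : Claim_equal_sentenceLengthsInLines := by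
  intro lines _
  unfold Spec_sentenceLengthsInLines sentenceLengthsInLines sentenceLengthsInLines_alt
  have h := pvLoop_agree lines 0 [] (-1)
  have h0 : (0 : Int) - (-1) - 1 = 0 := by ring
  rw [h0] at h
  simpa using h
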